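-- pv_equiv track=rewrite | github.com/networkx/networkx | networkx/readwrite/pajek.py | generate_pajek_clu
-- ===== SOURCE A (Python) =====
-- def generate_pajek_clu(communities):
--     """Generate lines in Pajek communities format (.clu).
--
--     Parameters
--     ----------
--     communities : list
--        A communities list
--
--     References
--     ----------
--     See http://vlado.fmf.uni-lj.si/pub/networks/pajek/doc/draweps.htm
--     for format information.
--     """
--
--     # We need a copy of the communities to use the strategy of removing vertices
--     communities_list = [inner_list[:] for inner_list in communities]
--     nnodes = sum([len(vertex) for vertex in communities])
--
--     # Write first line
--     yield f"*Vertices {nnodes}"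
--
--     # We do not assume that vertices:
--     # - Starts with the number 1
--     # - Are correlative
--     # Therefore we will look for the minimum then pop it
--
--     for n in range(nnodes):
--         # We look for the minimum vertex number
--         vertex = min([min(item) for item in communities_list if item])
--
--         # We find the community this vertex belongs to
--         community = next(i for i, v in enumerate(communities_list) if vertex in v)
--
--         # We put the community number in the row corresponding to the vertex
--         # We add 1 because Pajek communities starts with number 1
--         yield f"{community+1}"
--
--         # We remove this vertex from the communities structure
--         communities_list[community].remove(vertex)
-- ===== SOURCE B (Python) =====
-- def generate_pajek_clu(communities):
--     """Generate lines in Pajek communities format (.clu).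
--
--     Flatten to (vertex, community) pairs, sort once, and emit the
--     community number of each pair in ascending (vertex, community) order.
--     """
--     yield f"*Vertices {sum(len(c) for c in communities)}"
--     pairs = [(v, i) for i, comm in enumerate(communities) for v in comm]
--     pairs.sort()
--     for _, i in pairs:
--         yield f"{i + 1}"
-- ===== Notes on version B (the rewrite author's own statement) =====
-- stated objective: faster
-- what changed: A repeatedly scans all communities for the global minimum vertex and removes it (select-min-and-remove, quadratic); B flattens the structure once into (vertex, community) pairs, sorts them once, and emits the community numbers in sorted order.
import Mathlib
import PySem

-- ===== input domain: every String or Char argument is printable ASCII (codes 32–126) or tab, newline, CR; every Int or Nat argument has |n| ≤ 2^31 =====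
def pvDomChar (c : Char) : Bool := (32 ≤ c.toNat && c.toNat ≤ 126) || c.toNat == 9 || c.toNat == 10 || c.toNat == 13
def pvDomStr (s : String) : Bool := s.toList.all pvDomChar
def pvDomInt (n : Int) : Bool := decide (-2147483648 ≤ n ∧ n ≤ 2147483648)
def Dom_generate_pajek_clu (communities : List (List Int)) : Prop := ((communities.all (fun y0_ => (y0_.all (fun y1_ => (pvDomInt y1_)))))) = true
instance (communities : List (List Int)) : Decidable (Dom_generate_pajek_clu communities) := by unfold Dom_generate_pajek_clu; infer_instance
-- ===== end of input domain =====

-- B replaces A's quadratic select-min-and-remove loop by flattening to (vertex, community)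
-- pairs and sorting once (simpler and asymptotically faster by a single sort).

-- ===== PORT A =====
-- One iteration of A's `for n in range(nnodes)` loop body over the state
-- (communities_list, lines emitted so far).  The `none` branches are the points where
-- Python would raise (ValueError / StopIteration / IndexError); they are unreachable
-- while the loop invariant "nnodes elements remain" holds, and leave the state unchanged.
def pvStepA (st : List (List Int) × List String) : List (List Int) × List String :=
  -- vertex = min([min(item) for item in communities_list if item])
  -- (filterMap min? keeps exactly the nonempty lists, mapped to their minimum)
  match PySem.List.min? (st.1.filterMap (fun item => PySem.List.min? item (fun x => x))) (fun x => x) with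
  | none => st
  | some vertex =>
    -- community = next(i for i, v in enumerate(communities_list) if vertex in v)
    match List.findIdx? (fun item => item.contains vertex) st.1 with
    | none => st
    | some community =>
      -- communities_list[community].remove(vertex)
      match st.1[community]? with
      | none => st
      | some item =>
        match PySem.List.remove? item vertex with
        | none => st
        | some item' =>
          (st.1.set community item', st.2 ++ [PySem.Int.toStr ((community : Int) + 1)])

def generate_pajek_clu (communities : List (List Int)) : List String :=
  let communities_list := communities.map (fun inner_list => inner_list)
  let nnodes : Int := (communities.map (fun vertex => (vertex.length : Int))).sum
  let st := (PySem.List.pyRange 0 nnodes 1).foldl (fun st _ => pvStepA st) (communities_list, [])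
  ("*Vertices " ++ PySem.Int.toStr nnodes) :: st.2

-- ===== PORT B =====
def generate_pajek_clu_alt (communities : List (List Int)) : List String :=
  let nnodes : Int := communities.foldl (fun acc c => acc + (c.length : Int)) 0
  let pairs := (PySem.List.enumerate communities 0).flatMap (fun ic => ic.2.map (fun v => (v, ic.1)))
  let sortedPairs := PySem.List.sorted2 pairs (fun p => p.1) (fun p => p.2)
  ("*Vertices " ++ PySem.Int.toStr nnodes) :: sortedPairs.map (fun p => PySem.Int.toStr (p.2 + 1))

-- ===== PRECONDITION & SPEC =====
def Spec_generate_pajek_clu (communities : List (List Int)) (out : List String) : Prop := out = generate_pajek_clu_alt communities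
instance (communities : List (List Int)) (out : List String) : Decidable (Spec_generate_pajek_clu communities out) := by unfold Spec_generate_pajek_clu; infer_instance

-- ===== CLAIM (what is proved, stated in full; the proofs are below) =====
def Claim_equal_generate_pajek_clu : Prop := ∀ (communities : List (List Int)), Dom_generate_pajek_clu communities → Spec_generate_pajek_clu communities (generate_pajek_clu communities)

-- ===== LEMMAS AND PROOFS =====

-- the (vertex, community) pairs of a communities structure, community indices starting at i
def pvPairs (i : Int) : List (List Int) → List (Int × Int)
  | [] => []
  | c :: cs => c.map (fun v => (v, i)) ++ pvPairs (i + 1) cs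

-- lexicographic ≤ on (vertex, community) pairs (= Python tuple comparison)
def pvLe (a b : Int × Int) : Prop := a.1 < b.1 ∨ (a.1 = b.1 ∧ a.2 ≤ b.2)

theorem pvLe_refl (a : Int × Int) : pvLe a a := by unfold pvLe; omega

theorem pvLe_trans {a b c : Int × Int} (h1 : pvLe a b) (h2 : pvLe b c) : pvLe a c := by
  unfold pvLe at *; omega

theorem pvLe_antisymm {a b : Int × Int} (h1 : pvLe a b) (h2 : pvLe b a) : a = b := by
  unfold pvLe at *
  have : a.1 = b.1 ∧ a.2 = b.2 := by omega
  exact Prod.ext this.1 this.2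

def pvBefore (a b : Int × Int) : Bool :=
  decide (a.1 < b.1) || !decide (b.1 < a.1) && decide (a.2 < b.2)

theorem pvBefore_true {a b : Int × Int} (h : pvBefore a b = true) : pvLe a b := by
  unfold pvBefore at h; unfold pvLe; simp at h; omega

theorem pvBefore_false {a b : Int × Int} (h : pvBefore a b = false) : pvLe b a := by
  unfold pvBefore at h; unfold pvLe; simp at h; omega

theorem pvInsertBy_pairwise (x : Int × Int) (acc : List (Int × Int))
    (h : acc.Pairwise pvLe) : (PySem.List.insertBy pvBefore x acc).Pairwise pvLe := by
  induction acc with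
  | nil => simp [PySem.List.insertBy]
  | cons y ys ih =>
    rw [List.pairwise_cons] at h
    by_cases hb : pvBefore x y = true
    · simp only [PySem.List.insertBy, hb, if_true]
      refine List.Pairwise.cons ?_ (List.Pairwise.cons h.1 h.2)
      intro z hz
      rcases List.mem_cons.mp hz with rfl | hz
      · exact pvBefore_true hb
      · exact pvLe_trans (pvBefore_true hb) (h.1 z hz)
    · rw [Bool.not_eq_true] at hb
      simp only [PySem.List.insertBy, hb]
      refine List.Pairwise.cons ?_ (ih h.2)
      intro z hz
      rcases (PySem.List.mem_insertBy pvBefore x z ys).mp hz with rfl | hz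
      · exact pvBefore_false hb
      · exact h.1 z hz

theorem pvSorted2_pairwise (xs : List (Int × Int)) :
    (PySem.List.sorted2 xs (fun p => p.1) (fun p => p.2)).Pairwise pvLe := by
  show (List.foldl (fun acc x => PySem.List.insertBy _ x acc) [] xs).Pairwise pvLe
  have key : ∀ (l : List (Int × Int)) (acc : List (Int × Int)), acc.Pairwise pvLe →
      (List.foldl (fun acc x => PySem.List.insertBy pvBefore x acc) acc l).Pairwise pvLe := by
    intro l
    induction l with
    | nil => intro acc h; simpa using h
    | cons a t ih => intro acc h; exact ih _ (pvInsertBy_pairwise a acc h)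
  have : (fun (a b : Int × Int) => decide (a.1 < b.1) || !decide (b.1 < a.1) && decide (a.2 < b.2)) = pvBefore := rfl
  rw [this]
  exact key xs [] List.Pairwise.nil

-- two pvLe-ordered permutations of each other are equal
theorem pvSorted_unique {l₁ l₂ : List (Int × Int)} (hp : l₁.Perm l₂)
    (h1 : l₁.Pairwise pvLe) (h2 : l₂.Pairwise pvLe) : l₁ = l₂ :=
  List.eq_of_perm_of_sorted (fun _ _ _ _ hab hba => pvLe_antisymm hab hba) h1 h2 hp

theorem pvSorted2_eq_of_perm {xs ys : List (Int × Int)} (hp : ys.Perm xs)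
    (h : ys.Pairwise pvLe) : PySem.List.sorted2 xs (fun p => p.1) (fun p => p.2) = ys :=
  pvSorted_unique ((PySem.List.sorted2_perm xs _ _ false).trans hp.symm) (pvSorted2_pairwise xs) h

-- membership in pvPairs
theorem pvMem_pvPairs {x : Int × Int} {i : Int} {cl : List (List Int)} :
    x ∈ pvPairs i cl ↔ ∃ (j : Nat) (h : j < cl.length), x.2 = i + j ∧ x.1 ∈ cl[j] := by
  induction cl generalizing i with
  | nil => simp [pvPairs]
  | cons c cs ih =>
    simp only [pvPairs, List.mem_append, List.mem_map, ih]
    constructor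
    · rintro (⟨v, hv, rfl⟩ | ⟨j, hj, h2, h1⟩)
      · exact ⟨0, by simp, by simp, by simpa using hv⟩
      · exact ⟨j + 1, by simpa using hj, by push_cast; omega, by simpa using h1⟩
    · rintro ⟨j, hj, h2, h1⟩
      cases j with
      | zero => exact Or.inl ⟨x.1, by simpa using h1, Prod.ext rfl (by simp at h2; omega)⟩
      | succ j =>
        refine Or.inr ⟨j, by simpa using hj, by push_cast at h2 ⊢; omega, by simpa using h1⟩

theorem pvPairs_length (i : Int) (cl : List (List Int)) :
    (pvPairs i cl).length = (cl.map List.length).sum := by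
  induction cl generalizing i with
  | nil => rfl
  | cons c cs ih => simp [pvPairs, ih]

-- B's flatten-enumerate expression is pvPairs
theorem pvPairs_eq_flat (cl : List (List Int)) (s : Int) :
    (PySem.List.enumerate cl s).flatMap (fun ic => ic.2.map (fun v => (v, ic.1))) = pvPairs s cl := by
  induction cl generalizing s with
  | nil => rfl
  | cons c cs ih => simp [PySem.List.enumerate_cons, pvPairs, ih]

-- erasing the selected pair = removing the vertex from its community
theorem pvPairs_set_erase {cl : List (List Int)} {j : Nat} (hj : j < cl.length) {v : Int}
    (hv : v ∈ cl[j]) (i : Int) :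
    pvPairs i (cl.set j (cl[j].erase v)) = (pvPairs i cl).erase (v, i + j) := by
  induction cl generalizing i j with
  | nil => simp at hj
  | cons c cs ih =>
    cases j with
    | zero =>
      simp only [List.getElem_cons_zero] at hv ⊢
      simp only [List.set_cons_zero, pvPairs, Nat.cast_zero, add_zero]
      rw [List.erase_append_left _ (List.mem_map.mpr ⟨v, hv, rfl⟩)]
      have hinj : Function.Injective (fun w : Int => (w, i)) := by
        intro a b hab; simpa using hab
      rw [← List.map_erase hinj]
    | succ j =>
      simp only [List.getElem_cons_succ] at hv ⊢
      simp only [List.set_cons_succ, pvPairs]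
      rw [List.erase_append_right _ (by
        intro hmem
        simp only [List.mem_map] at hmem
        obtain ⟨a, _, hab⟩ := hmem
        have h2 := congrArg Prod.snd hab
        push_cast at h2; omega)]
      have hj' : j < cs.length := by simpa using hj
      rw [show i + ((j : Nat) + 1 : Nat) = (i + 1) + (j : Nat) from by push_cast; ring,
        ih hj' hv (i + 1)]

-- min? with identity key returns any lower bound that is a member
theorem pvMin?_eq_some {xs : List Int} {v : Int} (hm : v ∈ xs) (hlb : ∀ y ∈ xs, v ≤ y) :
    PySem.List.min? xs (fun x => x) = some v := by
  cases h : PySem.List.min? xs (fun x => x) with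
  | none => rw [PySem.List.min?_eq_none_iff] at h; subst h; simp at hm
  | some w =>
    have hw := PySem.List.min?_mem h
    have hmin := PySem.List.min?_isMin h
    have : w = v := le_antisymm (hmin v hm) (hlb w hw)
    rw [this]

-- the head of sorted2 pvPairs drives one iteration of A's loop
theorem pvStepA_eq {cl : List (List Int)} {out : List String} {v c : Int}
    {rest : List (Int × Int)}
    (h : PySem.List.sorted2 (pvPairs 0 cl) (fun p => p.1) (fun p => p.2) = (v, c) :: rest) :
    ∃ cl', pvStepA (cl, out) = (cl', out ++ [PySem.Int.toStr (c + 1)]) ∧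
      pvPairs 0 cl' = (pvPairs 0 cl).erase (v, c) := by
  have hperm := PySem.List.sorted2_perm (pvPairs 0 cl) (fun p => p.1) (fun p => p.2) false
  rw [h] at hperm
  have hpw := pvSorted2_pairwise (pvPairs 0 cl)
  rw [h] at hpw
  have hmin : ∀ x ∈ pvPairs 0 cl, pvLe (v, c) x := by
    intro x hx
    rcases List.mem_cons.mp (hperm.mem_iff.mpr hx) with heq | hr
    · rw [heq]; exact pvLe_refl _
    · exact (List.pairwise_cons.mp hpw).1 x hr
  have hmem : (v, c) ∈ pvPairs 0 cl := hperm.mem_iff.mp (List.mem_cons_self)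
  obtain ⟨j, hj, hc, hvj⟩ := pvMem_pvPairs.mp hmem
  simp only at hc hvj
  have hcj : c = (j : Int) := by omega
  subst hcj
  -- the minimum-of-minima computation returns v
  have hmin?A : PySem.List.min? (cl.filterMap (fun item => PySem.List.min? item (fun x => x)))
      (fun x => x) = some v := by
    apply pvMin?_eq_some
    · refine List.mem_filterMap.mpr ⟨cl[j], List.getElem_mem hj, ?_⟩
      apply pvMin?_eq_some hvj
      intro y hy
      have : (y, (j : Int)) ∈ pvPairs 0 cl := pvMem_pvPairs.mpr ⟨j, hj, by simp, hy⟩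
      have := hmin _ this
      unfold pvLe at this; simp at this; omega
    · intro y hy
      obtain ⟨item, hitem, hminy⟩ := List.mem_filterMap.mp hy
      have hy' : y ∈ item := PySem.List.min?_mem hminy
      obtain ⟨k, hk, hik⟩ := List.mem_iff_getElem.mp hitem
      have : (y, (k : Int)) ∈ pvPairs 0 cl := pvMem_pvPairs.mpr ⟨k, hk, by simp, hik ▸ hy'⟩
      have := hmin _ this
      unfold pvLe at this; simp at this; omega
  -- the first community containing v is community j
  have hfind : List.findIdx? (fun item => item.contains v) cl = some j := by
    rw [List.findIdx?_eq_some_iff_getElem]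
    refine ⟨hj, by simpa using hvj, ?_⟩
    intro k hkj
    simp only [List.contains_eq_mem, Bool.not_eq_true, decide_eq_false_iff_not]
    intro hvk
    have : (v, (k : Int)) ∈ pvPairs 0 cl :=
      pvMem_pvPairs.mpr ⟨k, Nat.lt_trans hkj hj, by simp, hvk⟩
    have := hmin _ this
    unfold pvLe at this; simp at this; omega
  have hget : cl[j]? = some cl[j] := List.getElem?_eq_getElem hj
  have hrem : PySem.List.remove? cl[j] v = some (cl[j].erase v) :=
    PySem.List.remove?_eq_some_erase _ v hvj
  refine ⟨cl.set j (cl[j].erase v), ?_, ?_⟩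
  · simp only [pvStepA, hmin?A, hfind, hget, hrem]
  · have := pvPairs_set_erase hj hvj 0
    rw [this]
    congr 1
    simp

-- the loop, with any fuel list of the right length
theorem pvLoop (fuel : List Int) : ∀ (cl : List (List Int)) (out : List String),
    (pvPairs 0 cl).length = fuel.length →
    ((fuel.foldl (fun st _ => pvStepA st) (cl, out)).2 =
      out ++ (PySem.List.sorted2 (pvPairs 0 cl) (fun p => p.1) (fun p => p.2)).map
        (fun p => PySem.Int.toStr (p.2 + 1))) := by
  induction fuel with
  | nil =>
    intro cl out hlen
    have h0 : pvPairs 0 cl = [] := List.eq_nil_of_length_eq_zero hlen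
    simp [h0, PySem.List.sorted2]
  | cons a t ih =>
    intro cl out hlen
    obtain ⟨⟨v, c⟩, rest, h⟩ : ∃ m rest,
        PySem.List.sorted2 (pvPairs 0 cl) (fun p => p.1) (fun p => p.2) = m :: rest := by
      cases hs : PySem.List.sorted2 (pvPairs 0 cl) (fun p => p.1) (fun p => p.2) with
      | nil =>
        exfalso
        have hp := (PySem.List.sorted2_perm (pvPairs 0 cl) (fun p => p.1) (fun p => p.2) false).length_eq
        rw [hs, hlen] at hp
        simp at hp
      | cons m rest => exact ⟨m, rest, rfl⟩
    obtain ⟨cl', hstep, hpairs⟩ := pvStepA_eq (out := out) h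
    have hperm := PySem.List.sorted2_perm (pvPairs 0 cl) (fun p => p.1) (fun p => p.2) false
    rw [h] at hperm
    have hmem : (v, c) ∈ pvPairs 0 cl := hperm.mem_iff.mp (List.mem_cons_self)
    have hrest : rest.Perm ((pvPairs 0 cl).erase (v, c)) :=
      (List.cons_perm_iff_perm_erase.mp hperm).2
    have hpw := pvSorted2_pairwise (pvPairs 0 cl)
    rw [h] at hpw
    have hsorted' : PySem.List.sorted2 (pvPairs 0 cl') (fun p => p.1) (fun p => p.2) = rest :=
      pvSorted2_eq_of_perm (hpairs ▸ hrest) (List.pairwise_cons.mp hpw).2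
    have hlen' : (pvPairs 0 cl').length = t.length := by
      rw [hpairs, List.length_erase_of_mem hmem]
      simp at hlen; omega
    simp only [List.foldl_cons, hstep]
    rw [ih cl' _ hlen', hsorted', h]
    simp

theorem pvNnodesA (cl : List (List Int)) :
    ((cl.map (fun v => (v.length : Int))).sum) = ((pvPairs 0 cl).length : Int) := by
  rw [pvPairs_length]
  induction cl with
  | nil => rfl
  | cons c cs ih =>
    simp only [List.map_cons, List.sum_cons] at ih ⊢
    push_cast [← ih]
    ring

theorem pvNnodesB (cl : List (List Int)) (a : Int) :
    cl.foldl (fun acc c => acc + (c.length : Int)) a = a + ((pvPairs 0 cl).length : Int) := by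
  rw [pvPairs_length]
  induction cl generalizing a with
  | nil => simp
  | cons c cs ih => simp [ih]; ring

-- ===== VERDICT (by name: the statement is the Claim_ definition above) =====
theorem generate_pajek_clu_spec : Claim_equal_generate_pajek_clu := by
  intro communities _
  unfold Spec_generate_pajek_clu generate_pajek_clu generate_pajek_clu_alt
  simp only [List.map_id', pvPairs_eq_flat, pvNnodesA, pvNnodesB]
  rw [pvLoop _ communities []
    (by rw [PySem.List.length_pyRange_one]; omega)]
  simp
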